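-- pv_equiv track=rewrite | github.com/MMMZZZZ/IconColoringHelper | IconColoringHelper.py | colConv565To24
-- ===== SOURCE A (Python) =====
-- def colConv565To24(col):
--     colBitsRGB = [5, 6, 5]
--     col24 = []
--     for i, e in enumerate(reversed(colBitsRGB)):
--         temp = col & ((1 << e) - 1)
--         temp = temp << (8 - e)
--         col24.append(temp)
--         col = col >> e
--     return tuple(reversed(col24))
-- ===== SOURCE B (Python) =====
-- def colConv565To24(col):
--     col, b = divmod(col, 32)
--     col, g = divmod(col, 64)
--     r = col % 32
--     return (r * 8, g * 4, b * 8)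
-- ===== Notes on version B (the rewrite author's own statement) =====
-- stated objective: simpler
-- what changed: Replaced the bitwise mask-and-shift loop (which builds a list and reverses it) with a chain of divmod base decompositions: each colour channel is peeled off the untouched arithmetic value as a remainder and rescaled by plain multiplication - no bit operations, no list, no loop.
import Mathlib
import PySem

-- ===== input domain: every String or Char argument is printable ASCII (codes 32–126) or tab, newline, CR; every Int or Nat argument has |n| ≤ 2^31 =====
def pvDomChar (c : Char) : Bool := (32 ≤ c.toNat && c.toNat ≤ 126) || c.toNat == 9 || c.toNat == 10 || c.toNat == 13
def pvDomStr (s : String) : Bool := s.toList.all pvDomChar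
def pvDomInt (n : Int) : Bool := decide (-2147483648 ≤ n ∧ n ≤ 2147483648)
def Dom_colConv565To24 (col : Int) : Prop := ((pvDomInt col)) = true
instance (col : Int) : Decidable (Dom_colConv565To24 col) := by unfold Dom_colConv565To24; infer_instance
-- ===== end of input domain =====

-- B replaces A's bitwise mask-and-shift loop by a chain of divmod base decompositions
-- (remainders modulo 32/64/32 scaled by multiplication); objective: simpler.


-- ===== PORT A =====
def colConv565To24 (col : Int) : Int × Int × Int :=
  -- colBitsRGB = [5, 6, 5]; loop over reversed(colBitsRGB) accumulating (col, col24)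
  let colBitsRGB : List Int := [5, 6, 5]
  let st := colBitsRGB.reverse.foldl
    (fun (st : Int × List Int) (e : Int) =>
      let col := st.1
      let col24 := st.2
      let temp := PySem.Int.band col (((1 : Int) <<< e.toNat) - 1)
      let temp := temp <<< (8 - e).toNat
      (col >>> e.toNat, col24 ++ [temp]))
    (col, [])
  match st.2.reverse with
  | [r, g, b] => (r, g, b)
  | _ => (0, 0, 0)  -- unreachable: the list has exactly 3 elements

-- ===== PORT B =====
def colConv565To24_alt (col : Int) : Int × Int × Int :=
  -- col, b = divmod(col, 32)
  let b := PySem.Int.mod col 32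
  let col1 := PySem.Int.floordiv col 32
  -- col, g = divmod(col, 64)
  let g := PySem.Int.mod col1 64
  let col2 := PySem.Int.floordiv col1 64
  -- r = col % 32
  let r := PySem.Int.mod col2 32
  (r * 8, g * 4, b * 8)

-- ===== PRECONDITION & SPEC =====
def Spec_colConv565To24 (col : Int) (out : Int × Int × Int) : Prop := out = colConv565To24_alt col
instance (col : Int) (out : Int × Int × Int) : Decidable (Spec_colConv565To24 col out) := by unfold Spec_colConv565To24; infer_instance

-- ===== CLAIM (what is proved, stated in full; the proofs are below) =====
def Claim_equal_colConv565To24 : Prop := ∀ (col : Int), Dom_colConv565To24 col → Spec_colConv565To24 col (colConv565To24 col)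

-- ===== LEMMAS AND PROOFS =====

-- Python a & (2^k - 1) equals a % 2^k (floor mod = Int emod, positive modulus).
lemma band_mask (a : Int) (k : Nat) :
    PySem.Int.band a ((2:Int)^k - 1) = a % ((2:Int)^k) := by
  have h2 : (0:Int) < 2^k := by positivity
  have hn : ((2^k : Nat) : Int) = (2:Int)^k := by push_cast; ring
  have ht : ((2:Int)^k - 1).toNat = 2^k - 1 := by omega
  by_cases ha : 0 ≤ a
  · have hb : (0:Int) ≤ 2^k - 1 := by omega
    simp only [PySem.Int.band, if_pos ha, if_pos hb]
    rw [ht, Nat.and_two_pow_sub_one_eq_mod]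
    conv_rhs => rw [← Int.toNat_of_nonneg ha, ← hn]
    push_cast
    rfl
  · have hb : (0:Int) ≤ 2^k - 1 := by omega
    simp only [PySem.Int.band, if_neg ha, if_pos hb]
    rw [ht, Nat.and_comm, Nat.and_two_pow_sub_one_eq_mod]
    have hma : a = -((-a - 1).toNat : Int) - 1 := by omega
    have hcast : (((-a - 1).toNat : Int)) % ((2:Int)^k)
        = (((-a - 1).toNat % 2^k : Nat) : Int) := by push_cast; rfl
    have hr0 : (0:Int) ≤ (((-a - 1).toNat : Int)) % ((2:Int)^k) :=
      Int.emod_nonneg _ (by omega)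
    have hrlt : (((-a - 1).toNat : Int)) % ((2:Int)^k) < (2:Int)^k :=
      Int.emod_lt_of_pos _ h2
    have key : a % (2:Int)^k
        = (2:Int)^k - 1 - (((-a - 1).toNat : Int)) % ((2:Int)^k) := by
      conv_lhs => rw [hma]
      have h1 : -(((-a - 1).toNat : Int)) - 1
          = ((2:Int)^k - 1 - (((-a - 1).toNat : Int)) % ((2:Int)^k))
            + (2:Int)^k * (-(((-a - 1).toNat : Int) / (2:Int)^k) - 1) := by
        have := Int.mul_ediv_add_emod (((-a - 1).toNat : Int)) ((2:Int)^k)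
        linarith
      rw [h1, Int.add_mul_emod_self_left, Int.emod_eq_of_lt (by omega) (by omega)]
    rw [key, hcast]
    omega

lemma band31 (a : Int) : PySem.Int.band a 31 = a % 32 := by
  have := band_mask a 5; norm_num at this; exact this

lemma band63 (a : Int) : PySem.Int.band a 63 = a % 64 := by
  have := band_mask a 6; norm_num at this; exact this

-- Python a >> k equals floor division by 2^k, for the two shifts used here.
lemma shr5 (a : Int) : a >>> (5:Nat) = a / 32 := by
  rw [Int.shiftRight_eq_div_pow]; norm_num

lemma shr6 (a : Int) : a >>> (6:Nat) = a / 64 := by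
  rw [Int.shiftRight_eq_div_pow]; norm_num

-- ===== VERDICT (by name: the statement is the Claim_ definition above) =====
theorem colConv565To24_spec : Claim_equal_colConv565To24 := by
  intro col _
  show _ = _
  simp only [colConv565To24, colConv565To24_alt, List.reverse, List.reverseAux,
    List.foldl, List.nil_append, List.cons_append]
  have h2 : (2:Int).toNat = 2 := rfl
  have h3 : (3:Int).toNat = 3 := rfl
  have h5 : (5:Int).toNat = 5 := rfl
  have h6 : (6:Int).toNat = 6 := rfl
  norm_num [h2, h3, h5, h6, Int.shiftLeft_eq, band31, band63, shr5, shr6]
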